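-- pv_equiv track=rewrite | github.com/poma-ai/poma-memory | poma_memory/tree.py | normalize_depths
-- ===== SOURCE A (Python) =====
-- def normalize_depths(chunks: list[dict]) -> list[dict]:
--     """Assign parent_chunk_index to each chunk based on depth hierarchy.
--
--     Walks the chunk list and for each chunk finds the nearest preceding
--     chunk with depth = current_depth - 1.
--
--     Args:
--         chunks: List from parse_indented_text()
--
--     Returns:
--         Same list with parent_chunk_index added to each dict.
--     """
--     # Stack of (depth, chunk_index) for tracking parent chain
--     stack: list[tuple[int, int]] = []
--
--     for chunk in chunks:
--         depth = chunk["depth"]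
--
--         # Pop stack entries that are at same or deeper depth
--         while stack and stack[-1][0] >= depth:
--             stack.pop()
--
--         # Parent is top of stack (if any)
--         chunk["parent_chunk_index"] = stack[-1][1] if stack else None
--
--         stack.append((depth, chunk["chunk_index"]))
--
--     return chunks
-- ===== SOURCE B (Python) =====
-- def normalize_depths(chunks: list[dict]) -> list[dict]:
--     """Two staged passes: extract (depth, chunk_index) info, compute all parents by
--     scanning the already-seen info for the nearest strictly smaller depth, then assign."""
--     info = [(c["depth"], c["chunk_index"]) for c in chunks]
--     parents = []
--     seen = []  # info of processed chunks, in order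
--     for d, ci in info:
--         parents.append(next((pci for pd, pci in reversed(seen) if pd < d), None))
--         seen.append((d, ci))
--     for c, p in zip(chunks, parents):
--         c["parent_chunk_index"] = p
--     return chunks
-- ===== Notes on version B (the rewrite author's own statement) =====
-- stated objective: alternative
-- what changed: Replaces the single-pass monotonic-stack mutation loop with three staged passes: extract (depth, chunk_index) pairs, compute each parent by a direct backward nearest-smaller-depth scan over the seen pairs, then zip the parents back onto the dicts.
import Mathlib
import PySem

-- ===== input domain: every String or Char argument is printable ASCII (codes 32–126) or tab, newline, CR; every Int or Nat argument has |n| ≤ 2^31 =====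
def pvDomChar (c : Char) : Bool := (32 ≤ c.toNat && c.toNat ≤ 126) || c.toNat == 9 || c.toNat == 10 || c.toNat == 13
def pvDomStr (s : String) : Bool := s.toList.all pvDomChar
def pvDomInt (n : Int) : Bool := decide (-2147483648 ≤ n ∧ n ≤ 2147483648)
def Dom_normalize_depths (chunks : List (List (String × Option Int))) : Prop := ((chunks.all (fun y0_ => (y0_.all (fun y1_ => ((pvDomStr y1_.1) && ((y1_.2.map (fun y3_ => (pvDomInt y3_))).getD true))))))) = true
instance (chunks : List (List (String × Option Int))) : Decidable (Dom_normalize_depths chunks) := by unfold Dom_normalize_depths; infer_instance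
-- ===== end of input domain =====

-- B replaces A's single-pass monotonic-stack loop with three staged passes (extract
-- (depth, chunk_index) info; compute all parents by a backward nearest-smaller-depth scan
-- of the seen info; zip the parents back onto the dicts) — alternative decomposition, not faster.
-- Both Pythons mutate the chunk dicts in place and return the same list object; the
-- equivalence proved is about the return value.

-- shared chunk accessors (chunk["depth"], chunk["chunk_index"], chunk["parent_chunk_index"] = v);
-- the .getD defaults are only reached outside Pre_ (where the Pythons raise)
def pvDepth (c : List (String × Option Int)) : Int :=
  (((PySem.Dict.mk c).get? "depth").getD none).getD 0
def pvCI (c : List (String × Option Int)) : Option Int :=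
  ((PySem.Dict.mk c).get? "chunk_index").getD none
def pvSetParent (c : List (String × Option Int)) (v : Option Int) : List (String × Option Int) :=
  ((PySem.Dict.mk c).insert "parent_chunk_index" v).items

-- ===== PORT A =====
-- 'while stack and stack[-1][0] >= depth: stack.pop()'  (list head = Python stack top)
def popWhileA (d : Int) : List (Int × Option Int) → List (Int × Option Int)
  | [] => []
  | (sd, si) :: rest => if sd ≥ d then popWhileA d rest else (sd, si) :: rest

def goA : List (List (String × Option Int)) → List (Int × Option Int) →
    List (List (String × Option Int)) → List (List (String × Option Int))
  | [], _, acc => acc.reverse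
  | c :: rest, stack, acc =>
    let d := pvDepth c
    let stack' := popWhileA d stack
    let parent : Option Int := match stack' with | [] => none | (_, pi) :: _ => pi
    goA rest ((d, pvCI c) :: stack') (pvSetParent c parent :: acc)

def normalize_depths (chunks : List (List (String × Option Int))) : List (List (String × Option Int)) :=
  goA chunks [] []

-- ===== PORT B =====
-- 'next((pci for pd, pci in reversed(seen) if pd < d), None)' — 'seen' is kept reversed here
-- (cons = Python's append viewed from the reversed end), so the scan is a plain head-first walk
def nearestSmaller (d : Int) : List (Int × Option Int) → Option Int
  | [] => none
  | (pd, pci) :: rest => if pd < d then pci else nearestSmaller d rest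

-- the 'for d, ci in info' loop producing 'parents'
def parentsGo : List (Int × Option Int) → List (Int × Option Int) → List (Option Int)
  | [], _ => []
  | (d, ci) :: rest, seenRev => nearestSmaller d seenRev :: parentsGo rest ((d, ci) :: seenRev)

def normalize_depths_alt (chunks : List (List (String × Option Int))) : List (List (String × Option Int)) :=
  let info := chunks.map (fun c => (pvDepth c, pvCI c))
  let parents := parentsGo info []
  (chunks.zip parents).map (fun cp => pvSetParent cp.1 cp.2)

-- ===== PRECONDITION & SPEC =====
-- Pre_ = exactly the inputs where Python A returns: every chunk has "depth" and "chunk_index" keys,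
-- and every depth is an int — except that a single-chunk list may have depth None (no comparison happens).
def Pre_normalize_depths (chunks : List (List (String × Option Int))) : Prop :=
  (∀ c ∈ chunks, ((PySem.Dict.mk c).get? "depth").isSome = true ∧
      ((PySem.Dict.mk c).get? "chunk_index").isSome = true) ∧
  (chunks.length ≤ 1 ∨ ∀ c ∈ chunks, (((PySem.Dict.mk c).get? "depth").getD none).isSome = true)
instance (chunks : List (List (String × Option Int))) : Decidable (Pre_normalize_depths chunks) := by
  unfold Pre_normalize_depths; infer_instance

def pvWitness_normalize_depths : (List (List (String × Option Int))) :=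
  [[("depth", some 0), ("chunk_index", some 0)], [("depth", some 1), ("chunk_index", some 1)]]

def Spec_normalize_depths (chunks : List (List (String × Option Int))) (out : List (List (String × Option Int))) : Prop := out = normalize_depths_alt chunks
instance (chunks : List (List (String × Option Int))) (out : List (List (String × Option Int))) : Decidable (Spec_normalize_depths chunks out) := by unfold Spec_normalize_depths; infer_instance

-- ===== CLAIM (what is proved, stated in full; the proofs are below) =====
def Claim_equal_normalize_depths : Prop := ∀ (chunks : List (List (String × Option Int))), Dom_normalize_depths chunks → Pre_normalize_depths chunks → Spec_normalize_depths chunks (normalize_depths chunks)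

-- ===== LEMMAS AND PROOFS =====

-- the parent A reads: top of the (already popped) stack
def topIdx : List (Int × Option Int) → Option Int
  | [] => none
  | (_, pi) :: _ => pi

-- popping to a smaller-or-equal threshold again is the same as popping once to it
theorem popWhileA_popWhileA (d d' : Int) (h : d' ≤ d) (stack : List (Int × Option Int)) :
    popWhileA d' (popWhileA d stack) = popWhileA d' stack := by
  induction stack with
  | nil => rfl
  | cons p rest ih =>
    obtain ⟨sd, si⟩ := p
    by_cases hd : sd ≥ d
    · have hd' : sd ≥ d' := le_trans h hd
      simp [popWhileA, hd, hd', ih]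
    · simp [popWhileA, hd]

-- loop invariant: popping A's stack to any threshold finds the same parent as B's backward scan
def PVInv (stack seenRev : List (Int × Option Int)) : Prop :=
  ∀ d, topIdx (popWhileA d stack) = nearestSmaller d seenRev

theorem goA_eq_altB (rest : List (List (String × Option Int)))
    (stack seenRev : List (Int × Option Int)) (acc : List (List (String × Option Int)))
    (hinv : PVInv stack seenRev) :
    goA rest stack acc =
      acc.reverse ++
        (rest.zip (parentsGo (rest.map (fun c => (pvDepth c, pvCI c))) seenRev)).map
          (fun cp => pvSetParent cp.1 cp.2) := by
  induction rest generalizing stack seenRev acc with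
  | nil => simp [goA]
  | cons c rest ih =>
    have hpar : (match popWhileA (pvDepth c) stack with
        | [] => (none : Option Int) | (_, pi) :: _ => pi) = nearestSmaller (pvDepth c) seenRev := by
      have := hinv (pvDepth c)
      simpa [topIdx] using this
    have hinv' : PVInv ((pvDepth c, pvCI c) :: popWhileA (pvDepth c) stack)
        ((pvDepth c, pvCI c) :: seenRev) := by
      intro d'
      by_cases hle : pvDepth c ≥ d'
      · have hlt : ¬ pvDepth c < d' := by omega
        simp only [popWhileA, hle, if_pos, nearestSmaller, if_neg hlt]
        rw [popWhileA_popWhileA _ _ (by omega)]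
        exact hinv d'
      · have hlt : pvDepth c < d' := by omega
        simp only [popWhileA, if_neg hle, nearestSmaller, if_pos hlt, topIdx]
    simp only [goA, hpar]
    rw [ih _ _ _ hinv']
    simp [List.map, parentsGo, List.zip]

-- ===== VERDICT (by name: the statement is the Claim_ definition above) =====
theorem normalize_depths_spec : Claim_equal_normalize_depths := by
  intro chunks _ _
  show normalize_depths chunks = normalize_depths_alt chunks
  simpa [normalize_depths_alt] using goA_eq_altB chunks [] [] [] (fun _ => rfl)
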